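-- pv_equiv track=rewrite | github.com/jm9176/Data_structures | Nxt_greater_num_in_the_list.py | rtd_gtr
-- ===== SOURCE A (Python) =====
-- def rtd_gtr(arr):
--
--     # List storing the next greater element
--     gtr_list = []
--
--     # Iterating over the entire list elements
--     for i in range(len(arr)):
--
--         # Initial condition to assign a maximum
--         # value to a temp variable. If the list
--         # element is the last element, then add
--         # -1 to the gtr_list
--         if i < len(arr) - 1:
--             temp = max(arr[i:len(arr)])
--         else:
--             gtr_list.append(-1)
--             return gtr_list
--
--         # Condition for the intermediate element.
--         # If the element is the largest in the list
--         # then add -1 to gtr_list and move to the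
--         # next iteration
--         if arr[i] == temp:
--             gtr_list.append(-1)
--             continue
--
--         # Loop to find the greater element from the
--         # remaining list, such that the element is
--         # next greater than the selected element
--         for j in range(i, len(arr)):
--             if arr[j] > arr[i] and arr[j] < temp:
--                 temp = arr[j]
--
--         gtr_list.append(temp)
-- ===== SOURCE B (Python) =====
-- def rtd_gtr(arr):
--     res = []
--     suf = []  # sorted list of the elements seen so far (the suffix)
--     for x in reversed(arr):
--         # binary search: first index lo with suf[lo] > x
--         lo, hi = 0, len(suf)
--         while lo < hi:
--             mid = (lo + hi) // 2
--             if suf[mid] <= x: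
--                 lo = mid + 1
--             else:
--                 hi = mid
--         res.append(suf[lo] if lo < len(suf) else -1)
--         suf.insert(lo, x)
--     res.reverse()
--     return res
-- ===== Notes on version B (the rewrite author's own statement) =====
-- stated objective: faster
-- what changed: A scans the whole suffix twice per position (max, then a refining scan); B makes one right-to-left pass keeping the suffix as a sorted list and answers each element with a binary-search successor query, returning [] instead of A's None on the empty list (excluded by Pre_).
-- outside the precondition, e.g. on rtd_gtr([]): A returns None, B returns []
import Mathlib
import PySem

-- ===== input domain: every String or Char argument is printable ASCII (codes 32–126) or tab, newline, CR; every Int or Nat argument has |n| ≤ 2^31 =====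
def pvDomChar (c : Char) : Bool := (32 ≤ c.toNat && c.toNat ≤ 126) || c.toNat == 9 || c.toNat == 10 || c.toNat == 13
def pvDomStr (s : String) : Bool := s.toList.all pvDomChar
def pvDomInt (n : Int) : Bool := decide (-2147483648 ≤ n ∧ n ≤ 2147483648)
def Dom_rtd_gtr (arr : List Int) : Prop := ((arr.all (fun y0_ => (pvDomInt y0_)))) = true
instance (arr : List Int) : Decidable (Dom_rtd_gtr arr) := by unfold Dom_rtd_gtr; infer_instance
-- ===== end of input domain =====

-- B replaces A's two suffix scans per position by one right-to-left pass with a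
-- binary-search successor query into a sorted list of the suffix (objective: faster).

-- ===== PORT A =====
-- literal port of A's indexed loop with early return at the last index
def pvGoA (arr : List Int) (i : Nat) (gtr : List Int) : List Int :=
  if i < arr.length then
    if i < arr.length - 1 then
      -- temp = max(arr[i:len(arr)])  (slice nonempty here, so .getD is never used)
      let temp := (PySem.List.max? (PySem.List.slice arr (some (i : Int)) (some (arr.length : Int))) (fun y => y)).getD 0
      let x := arr.getD i 0        -- arr[i], i in range
      if x = temp then
        pvGoA arr (i + 1) (gtr ++ [-1])
      else
        -- for j in range(i, len(arr)): if arr[j] > arr[i] and arr[j] < temp: temp = arr[j]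
        let temp2 := (PySem.List.pyRange (i : Int) (arr.length : Int) 1).foldl
          (fun t j => if x < PySem.List.pyGetD arr j 0 ∧ PySem.List.pyGetD arr j 0 < t
                      then PySem.List.pyGetD arr j 0 else t) temp
        pvGoA arr (i + 1) (gtr ++ [temp2])
    else gtr ++ [-1]               -- append -1 and return
  else gtr                         -- loop falls through (only for arr = []): Python returns None, outside Pre_
termination_by arr.length - i

def rtd_gtr (arr : List Int) : List Int := pvGoA arr 0 []

-- ===== PORT B =====
-- the hand-written binary search of Source B: first index lo in [lo,hi) with suf[lo] > x
-- (indices stay nonnegative and in range, so Nat division and .getD are exact here)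
def pvBs (suf : List Int) (x : Int) (lo hi : Nat) : Nat :=
  if lo < hi then
    let mid := (lo + hi) / 2
    if PySem.List.pyGetD suf (mid : Int) 0 ≤ x then pvBs suf x (mid + 1) hi
    else pvBs suf x lo mid
  else lo
termination_by hi - lo

-- one iteration of Source B's loop over reversed(arr): state = (res, sorted suffix)
def pvStepB (st : List Int × List Int) (x : Int) : List Int × List Int :=
  let res := st.1
  let suf := st.2
  let lo := pvBs suf x 0 suf.length
  (res ++ [if lo < suf.length then PySem.List.pyGetD suf (lo : Int) 0 else -1],
   PySem.List.insert suf (lo : Int) x)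

def rtd_gtr_alt (arr : List Int) : List Int :=
  ((arr.reverse.foldl pvStepB ([], [])).1).reverse

-- ===== PRECONDITION & SPEC =====
-- Pre_ excludes only the empty list, on which A falls through its loop and returns None (not a list); B returns [].
def Pre_rtd_gtr (arr : List Int) : Prop := arr ≠ []
instance (arr : List Int) : Decidable (Pre_rtd_gtr arr) := by unfold Pre_rtd_gtr; infer_instance
def pvWitness_rtd_gtr : List Int := ([4, 1, 3, 2])

def Spec_rtd_gtr (arr : List Int) (out : List Int) : Prop := out = rtd_gtr_alt arr
instance (arr : List Int) (out : List Int) : Decidable (Spec_rtd_gtr arr out) := by unfold Spec_rtd_gtr; infer_instance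

-- ===== CLAIM (what is proved, stated in full; the proofs are below) =====
def Claim_equal_rtd_gtr : Prop := ∀ (arr : List Int), Dom_rtd_gtr arr → Pre_rtd_gtr arr → Spec_rtd_gtr arr (rtd_gtr arr)

-- ===== LEMMAS AND PROOFS =====

-- the common specification: for each element, the least strictly greater value in the rest of the list, else -1
def pvSucc (x : Int) (l : List Int) : Int := ((l.filter (fun y => x < y)).min?).getD (-1)

def pvNge : List Int → List Int
  | [] => []
  | x :: rest => pvSucc x rest :: pvNge rest

-- min? is determined by the multiset of elements
lemma pv_min?_perm (l l' : List Int) (h : l.Perm l') : l.min? = l'.min? := by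
  cases hm : l.min? with
  | none =>
    rw [List.min?_eq_none_iff] at hm
    subst hm
    rw [eq_comm, List.min?_eq_none_iff, h.nil_eq]
  | some m =>
    rw [List.min?_eq_some_iff] at hm
    rw [eq_comm, List.min?_eq_some_iff]
    exact ⟨h.mem_iff.mp hm.1, fun b hb => hm.2 b (h.mem_iff.mpr hb)⟩

-- A's refining inner loop is a fold of `min` over the filtered list
lemma pv_foldA_eq (x : Int) (l : List Int) (t : Int) :
    l.foldl (fun t y => if x < y ∧ y < t then y else t) t
      = (l.filter (fun y => x < y)).foldl min t := by
  induction l generalizing t with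
  | nil => rfl
  | cons y l ih =>
    simp only [List.foldl_cons, List.filter_cons]
    by_cases hxy : x < y
    · simp only [hxy, decide_true, if_true, List.foldl_cons]
      rw [ih]
      congr 1
      rcases lt_or_ge y t with h | h
      · simp [h, le_of_lt h]
      · simp only [true_and, if_neg (not_lt_of_ge h), min_def]
        omega
    · simp [hxy, ih]

-- min over (t :: F) when t ∈ F is min over F
lemma pv_foldl_min_mem (t : Int) (F : List Int) (h : t ∈ F) :
    some (F.foldl min t) = F.min? := by
  have h1 : (t :: F).min? = some (F.foldl min t) := List.min?_cons'
  rw [List.min?_eq_some_iff] at h1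
  rw [eq_comm, List.min?_eq_some_iff]
  refine ⟨?_, fun b hb => h1.2 b (List.mem_cons_of_mem _ hb)⟩
  rcases List.mem_cons.mp h1.1 with h2 | h2
  · rw [h2]; exact h
  · exact h2

-- main lemma for A: the loop from index i appends pvNge of the suffix
lemma pvGoA_eq (arr : List Int) : ∀ i gtr, i < arr.length →
    pvGoA arr i gtr = gtr ++ pvNge (arr.drop i) := by
  intro i
  induction hn : arr.length - i using Nat.strong_induction_on generalizing i with
  | _ n ih =>
  intro gtr h
  rw [pvGoA, if_pos h]
  have hdrop : arr.drop i = arr[i] :: arr.drop (i + 1) := List.drop_eq_getElem_cons h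
  have hx : arr.getD i 0 = arr[i] := List.getD_eq_getElem _ _ h
  by_cases h2 : i < arr.length - 1
  · rw [if_pos h2]
    have hsucc : i + 1 < arr.length := by omega
    have hslice : PySem.List.slice arr (some (i : Int)) (some (arr.length : Int)) = arr.drop i := by
      rw [PySem.List.slice_natCast, List.take_of_length_le (by simp)]
    obtain ⟨m, hm⟩ : ∃ m, PySem.List.max? (arr.drop i) (fun y => y) = some m := by
      cases hc : PySem.List.max? (arr.drop i) (fun y => y) with
      | none =>
        rw [PySem.List.max?_eq_none_iff, hdrop] at hc
        simp at hc
        omega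
      | some m => exact ⟨m, rfl⟩
    have hmmem : m ∈ arr.drop i := PySem.List.max?_mem hm
    have hmmax : ∀ y ∈ arr.drop i, y ≤ m := PySem.List.max?_isMax hm
    rw [hslice, hm]
    simp only [Option.getD_some, hx]
    by_cases heq : arr[i] = m
    · rw [if_pos heq, ih (arr.length - (i+1)) (by omega) (i+1) rfl _ hsucc, hdrop]
      have hnil : pvSucc arr[i] (arr.drop (i + 1)) = -1 := by
        unfold pvSucc
        rw [List.filter_eq_nil_iff.mpr ?_]
        · rfl
        · intro y hy
          have : y ≤ m := hmmax y (hdrop ▸ List.mem_cons_of_mem _ hy)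
          simp [heq]; omega
      simp [pvNge, hnil]
    · rw [if_neg heq]
      have hfold := PySem.List.foldl_pyRange_pyGetD' arr 0
        (fun t y => if arr[i] < y ∧ y < t then y else t) m (a := (i : Int)) (by positivity)
      simp only [Int.toNat_natCast] at hfold
      rw [hfold, hdrop, List.foldl_cons]
      have hstep : (if arr[i] < arr[i] ∧ arr[i] < m then arr[i] else m) = m := by
        simp
      rw [hstep, pv_foldA_eq]
      -- m is a member of the filtered tail
      have hxm : arr[i] < m := by
        have : arr[i] ≤ m := hmmax _ (hdrop ▸ List.mem_cons_self)
        omega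
      have hmtail : m ∈ arr.drop (i + 1) := by
        rcases List.mem_cons.mp (hdrop ▸ hmmem) with h' | h'
        · omega
        · exact h'
      have hmfil : m ∈ (arr.drop (i + 1)).filter (fun y => decide (arr[i] < y)) := by
        simp [List.mem_filter, hmtail, hxm]
      have hval : ((arr.drop (i + 1)).filter (fun y => decide (arr[i] < y))).foldl min m
          = pvSucc arr[i] (arr.drop (i + 1)) := by
        unfold pvSucc
        rw [← pv_foldl_min_mem _ _ hmfil]
        rfl
      rw [hval, ih (arr.length - (i+1)) (by omega) (i+1) rfl _ hsucc]
      simp [pvNge]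
  · rw [if_neg h2]
    have hlen : (arr.drop i).length = 1 := by simp; omega
    obtain ⟨a, ha⟩ := List.length_eq_one_iff.mp hlen
    rw [ha]
    simp [pvNge, pvSucc]

lemma pv_getD_mono (suf : List Int) (hs : suf.Pairwise (· ≤ ·)) :
    ∀ p q : Nat, p ≤ q → q < suf.length → suf.getD p 0 ≤ suf.getD q 0 := by
  intro p q hpq hq
  have hp : p < suf.length := lt_of_le_of_lt hpq hq
  rw [List.getD_eq_getElem _ _ hp, List.getD_eq_getElem _ _ hq]
  rcases eq_or_lt_of_le hpq with rfl | h
  · exact le_refl _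
  · exact List.pairwise_iff_getElem.mp hs p q hp hq h

-- binary-search specification on a sorted list
lemma pvBs_spec (suf : List Int) (x : Int) (hs : suf.Pairwise (· ≤ ·)) :
    ∀ n lo hi, hi - lo ≤ n → lo ≤ hi → hi ≤ suf.length →
    (∀ k, k < lo → suf.getD k 0 ≤ x) →
    (∀ k, hi ≤ k → k < suf.length → x < suf.getD k 0) →
    lo ≤ pvBs suf x lo hi ∧ pvBs suf x lo hi ≤ hi ∧
    (∀ k, k < pvBs suf x lo hi → suf.getD k 0 ≤ x) ∧
    (∀ k, pvBs suf x lo hi ≤ k → k < suf.length → x < suf.getD k 0) := by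
  intro n
  induction n with
  | zero =>
    intro lo hi hn hle hhi h1 h2
    have hnl : ¬ lo < hi := by omega
    rw [pvBs, if_neg hnl]
    exact ⟨le_refl _, hle, h1, fun k hk hk2 => h2 k (by omega) hk2⟩
  | succ n ih =>
    intro lo hi hn hle hhi h1 h2
    by_cases hlt : lo < hi
    · rw [pvBs, if_pos hlt]
      simp only []
      set mid := (lo + hi) / 2 with hmid
      have hmlen : mid < suf.length := by omega
      rw [show PySem.List.pyGetD suf (mid : Int) 0 = suf.getD mid 0 from by
        simp [PySem.List.pyGetD_natCast]]
      by_cases hc : suf.getD mid 0 ≤ x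
      · rw [if_pos hc]
        exact (ih (mid + 1) hi (by omega) (by omega) hhi
          (fun k hk => le_trans (pv_getD_mono suf hs k mid (by omega) hmlen) hc) h2).imp
          (fun h => by omega) (fun h => h)
      · rw [if_neg hc]
        have hc' : x < suf.getD mid 0 := by omega
        exact (ih lo mid (by omega) (by omega) (by omega) h1
          (fun k hk hk2 => lt_of_lt_of_le hc' (pv_getD_mono suf hs mid k hk hk2))).imp
          (fun h => h) (fun h => h.imp (fun h => by omega) (fun h => h))
    · rw [pvBs, if_neg hlt]
      exact ⟨le_refl _, hle, h1, fun k hk hk2 => h2 k (by omega) hk2⟩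

-- min? of a sorted list is its head
lemma pv_min?_sorted (l : List Int) (hs : l.Pairwise (· ≤ ·)) : l.min? = l.head? := by
  cases l with
  | nil => rfl
  | cons a t =>
    rw [List.head?_cons, List.min?_eq_some_iff]
    exact ⟨List.mem_cons_self, fun b hb => by
      rcases List.mem_cons.mp hb with rfl | hb
      · exact le_refl _
      · exact (List.pairwise_cons.mp hs).1 b hb⟩

-- invariant of B's loop: res holds pvNge reversed, suf is a sorted permutation of the processed suffix
lemma pvGoB_inv (l : List Int) :
    (l.reverse.foldl pvStepB ([], [])).1 = (pvNge l).reverse ∧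
    (l.reverse.foldl pvStepB ([], [])).2.Perm l ∧
    (l.reverse.foldl pvStepB ([], [])).2.Pairwise (· ≤ ·) := by
  induction l with
  | nil => simp [pvNge]
  | cons x l ih =>
    obtain ⟨hres, hperm, hsort⟩ := ih
    simp only [List.reverse_cons, List.foldl_append, List.foldl_cons, List.foldl_nil] at *
    set st := l.reverse.foldl pvStepB ([], []) with hst
    simp only [pvStepB]
    set suf := st.2 with hsuf
    set r := pvBs suf x 0 suf.length with hr
    obtain ⟨-, hrle, h1, h2⟩ := pvBs_spec suf x hsort suf.length 0 suf.length
      (by omega) (by omega) (le_refl _)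
      (fun k hk => absurd hk (by omega)) (fun k hk hk2 => absurd hk2 (by omega))
    have htake : ∀ y ∈ suf.take r, y ≤ x := by
      intro y hy
      obtain ⟨k, hk, hval⟩ := List.mem_iff_getElem.mp hy
      have hk' : k < suf.length := by simp at hk; omega
      have hyk : y = suf.getD k 0 := by
        rw [List.getD_eq_getElem _ _ hk', ← hval, List.getElem_take]
      rw [hyk]; exact h1 k (by simp at hk; omega)
    have hdropgt : ∀ y ∈ suf.drop r, x < y := by
      intro y hy
      obtain ⟨k, hk, hval⟩ := List.mem_iff_getElem.mp hy
      have hlen : k + r < suf.length := by simp at hk; omega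
      have hyk : y = suf.getD (r + k) 0 := by
        rw [List.getD_eq_getElem _ _ (by omega), ← hval, List.getElem_drop]
      rw [hyk]; exact h2 (r + k) (by omega) (by omega)
    have hfil : suf.filter (fun y => x < y) = suf.drop r := by
      conv_lhs => rw [← List.take_append_drop r suf]
      rw [List.filter_append,
        List.filter_eq_nil_iff.mpr (by intro a ha; simpa using not_lt_of_ge (htake a ha)),
        List.filter_eq_self.mpr (by intro a ha; simpa using hdropgt a ha), List.nil_append]
    have hans : (if r < suf.length then PySem.List.pyGetD suf (r : Int) 0 else -1) = pvSucc x l := by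
      unfold pvSucc
      rw [← pv_min?_perm _ _ (hperm.filter _), hfil]
      by_cases hrl : r < suf.length
      · rw [if_pos hrl, pv_min?_sorted _ (hsort.sublist (List.drop_sublist _ _)),
          List.head?_drop, List.getElem?_eq_getElem hrl]
        simp [List.getElem?_eq_getElem hrl]
      · rw [if_neg hrl]
        rw [List.drop_eq_nil_iff.mpr (by omega)]
        rfl
    have hins : PySem.List.insert suf (r : Int) x = suf.take r ++ x :: suf.drop r :=
      PySem.List.insert_natCast _ _ _ hrle
    refine ⟨?_, ?_, ?_⟩
    · rw [hres, hans]
      simp [pvNge]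
    · rw [hins]
      exact (List.perm_middle.trans (by rw [List.take_append_drop])).trans (hperm.cons x)
    · rw [hins, List.pairwise_append]
      refine ⟨hsort.sublist (List.take_sublist _ _), List.pairwise_cons.mpr
        ⟨fun y hy => le_of_lt (hdropgt y hy), hsort.sublist (List.drop_sublist _ _)⟩,
        fun a ha b hb => ?_⟩
      rcases List.mem_cons.mp hb with rfl | hb
      · exact htake a ha
      · exact le_trans (htake a ha) (le_of_lt (hdropgt b hb))

lemma pv_alt_eq (arr : List Int) : rtd_gtr_alt arr = pvNge arr := by
  unfold rtd_gtr_alt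
  rw [(pvGoB_inv arr).1, List.reverse_reverse]

-- ===== VERDICT (by name: the statement is the Claim_ definition above) =====
theorem rtd_gtr_spec : Claim_equal_rtd_gtr := by
  intro arr _hdom hpre
  unfold Spec_rtd_gtr
  rw [pv_alt_eq]
  have hlen : 0 < arr.length := List.length_pos_of_ne_nil hpre
  show pvGoA arr 0 [] = pvNge arr
  simpa using pvGoA_eq arr 0 [] hlen
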